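-- pv_equiv track=rewrite | github.com/goutam-kul/Multi_Purpose_NLP_service | src/models/sentiment_analyzer.py | _extract_sentiment_features
-- ===== SOURCE A (Python) =====
-- from typing import Dict, Optional
--
-- def _extract_sentiment_features(text: str) -> Dict:
--     positive_words = ["good", "great", "amazing", "excellent",
--                      "love", "loved", "loving" "wonderful", "fantastic", "enjoyed", "happy"]
--     negative_words = ["bad", "terrible", "awful", "awfully", "horrendous", "unpleasant"
--                      "horrible", "hate", "disappointed", "poor", "worst"]
--     intensifiers = ["very", "really", "extremely", "absolutely", "totally", "completely"]
--
--     # Conver to lower case for matching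
--     text_lower = text.lower()
--     words = text_lower.split()
--
--     # Find matches
--     found_positives = [word for word in words if word in positive_words]
--     found_negatives = [word for word in words if word in negative_words]
--     found_intensifiers = [word for word in words if word in intensifiers]
--
--     return {
--         "positive_words": found_positives,
--         "negative_words": found_negatives,
--         "intensifiers": found_intensifiers
--     }
-- ===== SOURCE B (Python) =====
-- def _extract_sentiment_features(text: str) -> dict:
--     positive_words = ["good", "great", "amazing", "excellent",
--                      "love", "loved", "loving" "wonderful", "fantastic", "enjoyed", "happy"]
--     negative_words = ["bad", "terrible", "awful", "awfully", "horrendous", "unpleasant"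
--                      "horrible", "hate", "disappointed", "poor", "worst"]
--     intensifiers = ["very", "really", "extremely", "absolutely", "totally", "completely"]
--
--     # One lookup table: keyword -> category, built once
--     cat = {}
--     for w in positive_words:
--         cat[w] = "pos"
--     for w in negative_words:
--         cat[w] = "neg"
--     for w in intensifiers:
--         cat[w] = "int"
--
--     found_positives = []
--     found_negatives = []
--     found_intensifiers = []
--     # Single pass over the words, bucketed by the table
--     for word in text.lower().split():
--         c = cat.get(word)
--         if c == "pos":
--             found_positives.append(word)
--         elif c == "neg":
--             found_negatives.append(word)
--         elif c == "int":
--             found_intensifiers.append(word)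
--
--     return {
--         "positive_words": found_positives,
--         "negative_words": found_negatives,
--         "intensifiers": found_intensifiers
--     }
-- ===== Notes on version B (the rewrite author's own statement) =====
-- stated objective: simpler
-- what changed: Replaced three separate membership-filter passes over the word list with one keyword-to-category lookup table built once and a single bucketing pass over the words.
import Mathlib
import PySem

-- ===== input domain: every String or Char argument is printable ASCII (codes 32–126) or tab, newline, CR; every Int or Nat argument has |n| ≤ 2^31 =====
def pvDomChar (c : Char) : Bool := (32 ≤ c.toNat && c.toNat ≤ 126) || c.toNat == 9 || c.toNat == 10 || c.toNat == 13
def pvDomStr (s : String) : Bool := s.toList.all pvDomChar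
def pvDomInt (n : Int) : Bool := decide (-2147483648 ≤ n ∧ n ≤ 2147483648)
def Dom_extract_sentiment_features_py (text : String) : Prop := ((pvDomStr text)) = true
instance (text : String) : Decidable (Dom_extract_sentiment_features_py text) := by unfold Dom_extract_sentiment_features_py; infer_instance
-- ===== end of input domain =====

-- B replaces A's three membership-filter passes by one keyword→category table and a single bucketing pass (simpler structure, same results).


-- ===== PORT A =====
-- the word lists (verbatim from the Python, including the concatenation typos "lovingwonderful" / "unpleasanthorrible")
def pvPositive : List String := ["good", "great", "amazing", "excellent", "love", "loved", "lovingwonderful", "fantastic", "enjoyed", "happy"]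
def pvNegative : List String := ["bad", "terrible", "awful", "awfully", "horrendous", "unpleasanthorrible", "hate", "disappointed", "poor", "worst"]
def pvIntensifiers : List String := ["very", "really", "extremely", "absolutely", "totally", "completely"]

def extract_sentiment_features_py (text : String) : List (String × List String) :=
  let text_lower := PySem.Str.lower text
  let words := PySem.Str.split₀ text_lower
  let found_positives := words.filter (fun word => pvPositive.contains word)
  let found_negatives := words.filter (fun word => pvNegative.contains word)
  let found_intensifiers := words.filter (fun word => pvIntensifiers.contains word)
  [("positive_words", found_positives),
   ("negative_words", found_negatives),
   ("intensifiers", found_intensifiers)]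

-- ===== PORT B =====
-- the keyword→category table: cat = {}; cat[w] = "pos"/"neg"/"int" for each list in turn
def pvCat : PySem.Dict String String :=
  let cat : PySem.Dict String String := PySem.Dict.empty
  let cat := pvPositive.foldl (fun d w => PySem.Dict.insert d w "pos") cat
  let cat := pvNegative.foldl (fun d w => PySem.Dict.insert d w "neg") cat
  pvIntensifiers.foldl (fun d w => PySem.Dict.insert d w "int") cat

-- loop body: bucket one word by its category (cat.get(word))
def pvBucket (acc : List String × List String × List String) (word : String) :
    List String × List String × List String :=
  match PySem.Dict.get? pvCat word with
  | some "pos" => (acc.1 ++ [word], acc.2.1, acc.2.2)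
  | some "neg" => (acc.1, acc.2.1 ++ [word], acc.2.2)
  | some "int" => (acc.1, acc.2.1, acc.2.2 ++ [word])
  | _ => acc

def extract_sentiment_features_py_alt (text : String) : List (String × List String) :=
  let words := PySem.Str.split₀ (PySem.Str.lower text)
  let r := words.foldl pvBucket ([], [], [])
  [("positive_words", r.1),
   ("negative_words", r.2.1),
   ("intensifiers", r.2.2)]

-- ===== PRECONDITION & SPEC =====
def Spec_extract_sentiment_features_py (text : String) (out : List (String × List String)) : Prop := out = extract_sentiment_features_py_alt text
instance (text : String) (out : List (String × List String)) : Decidable (Spec_extract_sentiment_features_py text out) := by unfold Spec_extract_sentiment_features_py; infer_instance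

-- ===== CLAIM (what is proved, stated in full; the proofs are below) =====
def Claim_equal_extract_sentiment_features_py : Prop := ∀ (text : String), Dom_extract_sentiment_features_py text → Spec_extract_sentiment_features_py text (extract_sentiment_features_py text)

-- ===== LEMMAS AND PROOFS =====

-- the three keyword lists are pairwise disjoint (the typo-merged tokens included)
theorem pv_pos_not_neg {w : String} (h : w ∈ pvPositive) : w ∉ pvNegative := by
  fin_cases h <;> decide

theorem pv_pos_not_int {w : String} (h : w ∈ pvPositive) : w ∉ pvIntensifiers := by
  fin_cases h <;> decide

theorem pv_neg_not_int {w : String} (h : w ∈ pvNegative) : w ∉ pvIntensifiers := by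
  fin_cases h <;> decide

-- one step of B's bucketing pass, characterised by the three memberships A tests
theorem pvBucket_step (p n i : List String) (w : String) :
    pvBucket (p, n, i) w =
      (if w ∈ pvPositive then (p ++ [w], n, i)
       else if w ∈ pvNegative then (p, n ++ [w], i)
       else if w ∈ pvIntensifiers then (p, n, i ++ [w])
       else (p, n, i)) := by
  by_cases h1 : w ∈ pvPositive
  · simp only [if_pos h1]; fin_cases h1 <;> rfl
  · by_cases h2 : w ∈ pvNegative
    · simp only [if_neg h1, if_pos h2]; fin_cases h2 <;> rfl
    · by_cases h3 : w ∈ pvIntensifiers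
      · simp only [if_neg h1, if_neg h2, if_pos h3]; fin_cases h3 <;> rfl
      · simp only [if_neg h1, if_neg h2, if_neg h3]
        have hn : PySem.Dict.get? pvCat w = none := by
          simp only [pvPositive, pvNegative, pvIntensifiers, List.mem_cons,
            List.not_mem_nil, or_false, not_or] at h1 h2 h3
          obtain ⟨a1, a2, a3, a4, a5, a6, a7, a8, a9, a10⟩ := h1
          obtain ⟨b1, b2, b3, b4, b5, b6, b7, b8, b9, b10⟩ := h2
          obtain ⟨c1, c2, c3, c4, c5, c6⟩ := h3
          simp [pvCat, pvPositive, pvNegative, pvIntensifiers, PySem.Dict.get?_insert,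
            a1, a2, a3, a4, a5, a6, a7, a8, a9, a10,
            b1, b2, b3, b4, b5, b6, b7, b8, b9, b10, c1, c2, c3, c4, c5, c6]
        simp [pvBucket, hn]

-- the single bucketing pass computes A's three filters, appended to the accumulators
theorem pvBucket_fold (ws : List String) (p n i : List String) :
    ws.foldl pvBucket (p, n, i) =
      (p ++ ws.filter (fun w => decide (w ∈ pvPositive)),
       n ++ ws.filter (fun w => decide (w ∈ pvNegative)),
       i ++ ws.filter (fun w => decide (w ∈ pvIntensifiers))) := by
  induction ws generalizing p n i with
  | nil => simp
  | cons w ws ih =>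
    simp only [List.foldl_cons, pvBucket_step, List.filter_cons]
    by_cases h1 : w ∈ pvPositive
    · simp [h1, pv_pos_not_neg h1, pv_pos_not_int h1, ih]
    · by_cases h2 : w ∈ pvNegative
      · simp [h1, h2, pv_neg_not_int h2, ih]
      · by_cases h3 : w ∈ pvIntensifiers
        · simp [h1, h2, h3, ih]
        · simp [h1, h2, h3, ih]

-- ===== VERDICT (by name: the statement is the Claim_ definition above) =====
theorem extract_sentiment_features_py_spec : Claim_equal_extract_sentiment_features_py := by
  intro text _
  unfold Spec_extract_sentiment_features_py extract_sentiment_features_py extract_sentiment_features_py_alt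
  simp [pvBucket_fold]
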